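-- pv_equiv track=rewrite | github.com/AleksaMarinkovic/AdventOfCode2023 | Day 4/main.py | get_score_from_card
-- ===== SOURCE A (Python) =====
-- def get_score_from_card(card):
--     score = 0
--     for number_idx in range(len(card[1])):
--         if card[1][number_idx] in card[0]:
--             if score == 0:
--                 score += 1
--             else:
--                 score *= 2
--     return score
-- ===== SOURCE B (Python) =====
-- def get_score_from_card(card):
--     xs = sorted(set(card[0]))
--     ys = sorted(card[1])
--     i = j = m = 0
--     while i < len(xs) and j < len(ys):
--         if xs[i] < ys[j]:
--             i += 1
--         elif ys[j] < xs[i]: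
--             j += 1
--         else:
--             m += 1
--             j += 1
--     return 2 ** (m - 1) if m else 0
-- ===== Notes on version B (the rewrite author's own statement) =====
-- stated objective: alternative
-- what changed: Replaces A's doubling loop with an inner linear membership scan by sorting the deduplicated winning list and the card numbers, counting matches with a two-pointer merge over the two sorted lists, and finishing with the closed form 2**(m-1) (0 if no match).
import Mathlib
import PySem

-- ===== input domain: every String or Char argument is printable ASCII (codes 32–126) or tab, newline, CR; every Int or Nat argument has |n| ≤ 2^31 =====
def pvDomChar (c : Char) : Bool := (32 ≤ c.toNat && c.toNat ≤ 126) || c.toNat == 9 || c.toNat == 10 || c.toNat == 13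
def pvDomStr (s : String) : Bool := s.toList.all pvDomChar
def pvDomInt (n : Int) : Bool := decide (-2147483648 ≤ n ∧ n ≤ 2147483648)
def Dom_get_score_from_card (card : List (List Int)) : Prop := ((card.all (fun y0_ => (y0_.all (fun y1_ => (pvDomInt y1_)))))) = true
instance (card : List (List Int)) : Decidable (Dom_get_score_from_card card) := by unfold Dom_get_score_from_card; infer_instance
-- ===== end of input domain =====

-- B replaces A's doubling loop with nested membership scans by sorting both lists and counting
-- matches with a two-pointer merge, then the closed form 2^(m-1); an alternative algorithm.

-- ===== PORT A =====
def get_score_from_card (card : List (List Int)) : Int :=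
  (PySem.List.pyRange 0 ((PySem.List.pyGetD card 1 []).length : Int) 1).foldl
    (fun score number_idx =>
      if PySem.List.pyGetD (PySem.List.pyGetD card 1 []) number_idx 0 ∈ PySem.List.pyGetD card 0 [] then
        (if score = 0 then score + 1 else score * 2)
      else score) 0

-- ===== PORT B =====
-- the two-pointer while loop of Source B, as recursion on the two (sorted) lists; returns m
def pvTwoPtr : List Int → List Int → Nat
  | [], _ => 0
  | _ :: _, [] => 0
  | x :: xs, y :: ys =>
    if x < y then pvTwoPtr xs (y :: ys)
    else if y < x then pvTwoPtr (x :: xs) ys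
    else pvTwoPtr (x :: xs) ys + 1
termination_by xs ys => xs.length + ys.length

def get_score_from_card_alt (card : List (List Int)) : Int :=
  let xs := PySem.List.sorted (PySem.Set.ofList (PySem.List.pyGetD card 0 [])) (fun x => x) false
  let ys := PySem.List.sorted (PySem.List.pyGetD card 1 []) (fun x => x) false
  let m := pvTwoPtr xs ys
  if m ≠ 0 then 2 ^ (m - 1) else 0

-- ===== PRECONDITION & SPEC =====
-- Pre_ excludes exactly the inputs where A raises IndexError: card must have at least the two lists card[0], card[1].
def Pre_get_score_from_card (card : List (List Int)) : Prop := 2 ≤ card.length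
instance (card : List (List Int)) : Decidable (Pre_get_score_from_card card) := by unfold Pre_get_score_from_card; infer_instance
def pvWitness_get_score_from_card : List (List Int) := [[1, 2, 3], [2, 3, 7]]
def Spec_get_score_from_card (card : List (List Int)) (out : Int) : Prop := out = get_score_from_card_alt card
instance (card : List (List Int)) (out : Int) : Decidable (Spec_get_score_from_card card out) := by unfold Spec_get_score_from_card; infer_instance

-- ===== CLAIM (what is proved, stated in full; the proofs are below) =====
def Claim_equal_get_score_from_card : Prop := ∀ (card : List (List Int)), Dom_get_score_from_card card → Pre_get_score_from_card card → Spec_get_score_from_card card (get_score_from_card card)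

-- ===== LEMMAS AND PROOFS =====

-- A's loop body as a function of the element (after the index fold is bridged to a list fold).
def pvStep (w : List Int) (score : Int) (x : Int) : Int :=
  if x ∈ w then (if score = 0 then score + 1 else score * 2) else score

-- Loop invariant: starting from the score encoding k previous matches, folding l adds l's matches.
lemma pvLoop (w : List Int) (l : List Int) (k : Nat) :
    l.foldl (pvStep w) (if k = 0 then 0 else 2 ^ (k - 1)) =
      (if k + l.countP (· ∈ w) = 0 then 0 else 2 ^ (k + l.countP (· ∈ w) - 1)) := by
  induction l generalizing k with
  | nil => simp
  | cons x xs ih =>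
    by_cases hx : x ∈ w
    · have hstep : pvStep w (if k = 0 then 0 else 2 ^ (k - 1)) x =
          (if k + 1 = 0 then 0 else 2 ^ (k + 1 - 1)) := by
        unfold pvStep
        rcases Nat.eq_zero_or_pos k with hk | hk
        · simp [hx, hk]
        · have h2 : (2 : Int) ^ (k - 1) ≠ 0 := by positivity
          simp only [hx, if_pos, Nat.pos_iff_ne_zero.mp hk]
          simp [Nat.pos_iff_ne_zero.mp hk, h2]
          rw [← pow_succ]
          congr 1
          omega
      simp only [List.foldl_cons, hstep, ih (k + 1), List.countP_cons, hx, decide_true,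
        if_true]
      have e : k + 1 + xs.countP (fun x => decide (x ∈ w)) =
          k + (xs.countP (fun x => decide (x ∈ w)) + 1) := by omega
      rw [e]
    · have hstep : pvStep w (if k = 0 then 0 else 2 ^ (k - 1)) x =
          (if k = 0 then 0 else 2 ^ (k - 1)) := by
        unfold pvStep; simp [hx]
      simp [List.foldl_cons, hstep, ih k, hx]

lemma pvLoop0 (w : List Int) (l : List Int) :
    l.foldl (pvStep w) 0 =
      (if l.countP (· ∈ w) = 0 then 0 else 2 ^ (l.countP (· ∈ w) - 1)) := by
  have := pvLoop w l 0
  simpa using this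

-- Correctness of the two-pointer merge: on a strictly increasing xs and a sorted ys it counts
-- the elements of ys that occur in xs (duplicates of ys counted each time).
lemma pvTwoPtr_count (xs ys : List Int)
    (hxs : xs.Pairwise (· < ·)) (hys : ys.Pairwise (· ≤ ·)) :
    pvTwoPtr xs ys = ys.countP (· ∈ xs) := by
  induction xs, ys using pvTwoPtr.induct with
  | case1 ys => simp [pvTwoPtr]
  | case2 x xs => simp [pvTwoPtr]
  | case3 x xs y ys hxy ih =>
    -- x < y: x matches nothing in y::ys
    rw [pvTwoPtr]
    simp only [if_pos hxy]
    rw [ih (List.Pairwise.of_cons hxs) hys]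
    refine (List.countP_congr ?_).symm
    intro z hz
    have hyz : y ≤ z := by
      rcases List.mem_cons.mp hz with h | h
      · omega
      · exact List.rel_of_pairwise_cons hys h
    have hzx : z ≠ x := by omega
    simp [List.mem_cons, hzx]
  | case4 x xs y ys hxy hyx ih =>
    -- y < x: y is in neither x nor xs
    rw [pvTwoPtr]
    simp only [if_neg hxy, if_pos hyx]
    rw [ih hxs (List.Pairwise.of_cons hys)]
    have hy : y ∉ x :: xs := by
      intro hmem
      rcases List.mem_cons.mp hmem with h | h
      · omega
      · have := List.rel_of_pairwise_cons hxs h; omega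
    rw [List.countP_cons_of_neg (by simpa using hy)]
  | case5 x xs y ys hxy hyx ih =>
    -- x = y: a match
    rw [pvTwoPtr]
    simp only [if_neg hxy, if_neg hyx]
    have hxy' : x = y := by omega
    rw [ih hxs (List.Pairwise.of_cons hys)]
    rw [List.countP_cons_of_pos (by simp [← hxy'])]

-- the two-pointer count over the sorted lists is the match count over the original lists
lemma pvCount (w l : List Int) :
    pvTwoPtr (PySem.List.sorted (PySem.Set.ofList w) (fun x => x) false)
      (PySem.List.sorted l (fun x => x) false) = l.countP (· ∈ w) := by
  rw [pvTwoPtr_count _ _ (PySem.List.sorted_ofList_pairwise_lt w)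
    (by simpa using PySem.List.sorted_pairwise l (fun x => x))]
  rw [(PySem.List.sorted_perm l (fun x => x) false).countP_eq]
  refine List.countP_congr ?_
  intro z _
  simp [PySem.List.mem_sorted, PySem.Set.mem_ofList]

-- ===== VERDICT (by name: the statement is the Claim_ definition above) =====
theorem get_score_from_card_spec : Claim_equal_get_score_from_card := by
  intro card _ _
  unfold Spec_get_score_from_card get_score_from_card get_score_from_card_alt
  rw [show (fun score number_idx =>
      if PySem.List.pyGetD (PySem.List.pyGetD card 1 []) number_idx 0 ∈ PySem.List.pyGetD card 0 [] then
        (if score = 0 then score + 1 else score * 2)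
      else score) = (fun (score j : Int) => pvStep (PySem.List.pyGetD card 0 []) score
        (PySem.List.pyGetD (PySem.List.pyGetD card 1 []) j 0)) from rfl]
  rw [PySem.List.foldl_pyRange_zero_pyGetD' (PySem.List.pyGetD card 1 []) 0
      (pvStep (PySem.List.pyGetD card 0 [])) 0]
  rw [pvLoop0]
  dsimp only
  rw [pvCount]
  rcases Nat.eq_zero_or_pos ((PySem.List.pyGetD card 1 []).countP (· ∈ PySem.List.pyGetD card 0 [])) with h | h
  · simp [h]
  · rw [if_neg (Nat.pos_iff_ne_zero.mp h), if_pos (Nat.pos_iff_ne_zero.mp h)]
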